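-- pv_equiv track=rewrite | github.com/abdelfattah-lab/SplitReason | training/open-r1/offload_read_graph.py | get_bigmodel_mask
-- ===== SOURCE A (Python) =====
-- def get_bigmodel_mask(text, open_tag="<bigmodel>", close_tag="</bigmodel>"):
--     """
--     Return a list of 0/1 (len == len(text)) indicating
--     which character positions are inside <bigmodel> ... <\bigmodel>.
--     """
--     mask = [0] * len(text)
--     start_index = 0
--
--     while True:
--         # Find next opening tag
--         open_pos = text.find(open_tag, start_index)
--         if open_pos == -1:
--             # No more occurrences
--             break
--
--         # Find the corresponding closing tag
--         close_pos = text.find(close_tag, open_pos + len(open_tag))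
--         if close_pos == -1:
--             # If we can't find a close tag, stop
--             break
--
--         # Mark the range [open_pos, close_pos + len(close_tag)) as 1
--         region_end = min(close_pos + len(close_tag), len(text))
--         for i in range(open_pos, region_end):
--             mask[i] = 1
--
--         # Move ahead, searching after the close tag
--         start_index = region_end
--
--     return mask
-- ===== SOURCE B (Python) =====
-- def get_bigmodel_mask(text, open_tag="<bigmodel>", close_tag="</bigmodel>"):
--     """
--     Return a list of 0/1 (len == len(text)) indicating which character
--     positions are inside open_tag ... close_tag regions.
--     Strategy: precompute all occurrence positions of both tags once, pair
--     them into disjoint intervals, then emit the mask by concatenation.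
--     """
--     n = len(text)
--     opens = [i for i in range(n + 1) if text.startswith(open_tag, i)]
--     closes = [i for i in range(n + 1) if text.startswith(close_tag, i)]
--
--     intervals = []
--     pos = 0
--     for o in opens:
--         if o < pos:
--             continue
--         c = next((c for c in closes if c >= o + len(open_tag)), None)
--         if c is None:
--             break
--         end = c + len(close_tag)
--         intervals.append((o, end))
--         pos = end
--
--     pieces = []
--     prev = 0
--     for a, b in intervals:
--         pieces.append([0] * (a - prev))
--         pieces.append([1] * (b - a))
--         prev = b
--     pieces.append([0] * (n - prev))
--     return [bit for p in pieces for bit in p]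
-- ===== Notes on version B (the rewrite author's own statement) =====
-- stated objective: alternative
-- what changed: Replaces A's repeated text.find scanning with in-place mask mutation by precomputing both tags' occurrence-position lists once, pairing them into intervals with a single forward pass, and emitting the mask by concatenating zero/one runs.
-- outside the precondition, e.g. on get_bigmodel_mask('x', '', ''): A does not finish within the time limit, B returns [0]
import Mathlib
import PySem

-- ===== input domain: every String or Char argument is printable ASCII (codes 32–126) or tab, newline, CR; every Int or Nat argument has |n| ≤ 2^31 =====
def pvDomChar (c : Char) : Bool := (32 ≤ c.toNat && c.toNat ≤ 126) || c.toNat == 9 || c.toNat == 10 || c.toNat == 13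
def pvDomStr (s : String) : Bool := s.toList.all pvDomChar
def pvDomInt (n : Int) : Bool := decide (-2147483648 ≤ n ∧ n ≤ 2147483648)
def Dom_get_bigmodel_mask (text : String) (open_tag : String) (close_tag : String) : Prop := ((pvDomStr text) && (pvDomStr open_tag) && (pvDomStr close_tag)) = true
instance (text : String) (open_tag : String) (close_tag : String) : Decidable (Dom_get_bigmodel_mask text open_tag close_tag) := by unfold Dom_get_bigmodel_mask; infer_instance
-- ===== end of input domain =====

-- B replaces A's find/find/mutate-in-place while-loop by precomputing both tags' occurrence
-- lists once, pairing them into intervals, and emitting the mask by concatenation (objective: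
-- alternative — a different algorithm of similar cost).

-- ===== PORT A =====
-- port of `for i in range(open_pos, region_end): mask[i] = 1`
def pvMarkA (mask : List Int) (a b : Nat) : List Int :=
  (PySem.List.pyRange (a : Int) (b : Int) 1).foldl (fun m i => m.set i.toNat 1) mask

-- port of A's `while True:` loop; fuel `s.length + 2` only makes the recursion total:
-- under Pre_ (not both tags empty) start_index strictly increases and stays ≤ len(text),
-- so the fuel is never exhausted before the loop breaks (Python diverges outside Pre_).
def pvLoopA (s o c : List Char) (fuel : Nat) (mask : List Int) (start : Nat) : List Int :=
  match fuel with
  | 0 => mask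
  | f + 1 =>
    let openPos := PySem.Chars.findFrom s o (start : Int)
    if openPos = -1 then mask
    else
      let closePos := PySem.Chars.findFrom s c (openPos + (o.length : Int))
      if closePos = -1 then mask
      else
        let regionEnd := min (closePos.toNat + c.length) s.length
        pvLoopA s o c f (pvMarkA mask openPos.toNat regionEnd) regionEnd

def get_bigmodel_mask (text : String) (open_tag : String) (close_tag : String) : List Int :=
  let s := text.toList
  pvLoopA s open_tag.toList close_tag.toList (s.length + 2)
    (List.replicate s.length 0) 0

-- ===== PORT B =====
-- `[i for i in range(n + 1) if text.startswith(tag, i)]`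
def pvOcc (s : List Char) (tag : List Char) : List Nat :=
  (List.range (s.length + 1)).filter (fun i => PySem.Chars.startswith (s.drop i) tag)

-- the `for o in opens:` pairing loop (continue / next(...) / break)
def pvPairs (closes : List Nat) (lo lc : Nat) : List Nat → Nat → List (Nat × Nat)
  | [], _ => []
  | o :: rest, pos =>
    if o < pos then pvPairs closes lo lc rest pos
    else
      match closes.find? (fun c => decide (o + lo ≤ c)) with
      | none => []
      | some c => (o, c + lc) :: pvPairs closes lo lc rest (c + lc)

-- the pieces / flatten step: zeros up to each interval, ones across it, zeros after
def pvEmit (n : Nat) : List (Nat × Nat) → Nat → List Int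
  | [], prev => List.replicate (n - prev) 0
  | (a, b) :: rest, prev =>
      List.replicate (a - prev) 0 ++ List.replicate (b - a) 1 ++ pvEmit n rest b

def get_bigmodel_mask_alt (text : String) (open_tag : String) (close_tag : String) : List Int :=
  let s := text.toList
  pvEmit s.length
    (pvPairs (pvOcc s close_tag.toList) open_tag.toList.length close_tag.toList.length
      (pvOcc s open_tag.toList) 0) 0

-- ===== PRECONDITION & SPEC =====
-- Pre_ excludes only the case where both tags are empty strings: there Python A loops
-- forever (finding the empty tag never advances start_index), so A returns on no such input.
def Pre_get_bigmodel_mask (text : String) (open_tag : String) (close_tag : String) : Prop :=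
  ¬ (open_tag = "" ∧ close_tag = "")
instance (text : String) (open_tag : String) (close_tag : String) : Decidable (Pre_get_bigmodel_mask text open_tag close_tag) := by unfold Pre_get_bigmodel_mask; infer_instance

def pvWitness_get_bigmodel_mask : String × String × String :=
  ("a<b>x</b>c", "<b>", "</b>")

def Spec_get_bigmodel_mask (text : String) (open_tag : String) (close_tag : String) (out : List Int) : Prop := out = get_bigmodel_mask_alt text open_tag close_tag
instance (text : String) (open_tag : String) (close_tag : String) (out : List Int) : Decidable (Spec_get_bigmodel_mask text open_tag close_tag out) := by unfold Spec_get_bigmodel_mask; infer_instance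

-- ===== CLAIM (what is proved, stated in full; the proofs are below) =====
def Claim_equal_get_bigmodel_mask : Prop := ∀ (text : String) (open_tag : String) (close_tag : String), Dom_get_bigmodel_mask text open_tag close_tag → Pre_get_bigmodel_mask text open_tag close_tag → Spec_get_bigmodel_mask text open_tag close_tag (get_bigmodel_mask text open_tag close_tag)

-- ===== LEMMAS AND PROOFS =====

-- membership in an occurrence list
theorem pvOcc_mem {s tag : List Char} {i : Nat} :
    i ∈ pvOcc s tag ↔ i ≤ s.length ∧ tag <+: s.drop i := by
  simp [pvOcc, List.mem_filter, Nat.lt_succ_iff, PySem.Chars.startswith_iff, and_comm]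

theorem pvOcc_sorted (s tag : List Char) : (pvOcc s tag).Pairwise (· < ·) :=
  List.Pairwise.filter _ List.pairwise_lt_range

-- an occurrence leaves room for the tag
theorem pvOcc_add_le {s tag : List Char} {i : Nat} (h : i ∈ pvOcc s tag) :
    i + tag.length ≤ s.length := by
  obtain ⟨hle, hpre⟩ := pvOcc_mem.mp h
  have := hpre.length_le
  simp [List.length_drop] at this
  omega

-- find?-on-a-sorted-list returns the least element ≥ k
theorem find?_ge_sorted {l : List Nat} {k j : Nat} (hs : l.Pairwise (· < ·))
    (h : l.find? (fun c => decide (k ≤ c)) = some j) :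
    j ∈ l ∧ k ≤ j ∧ ∀ x ∈ l, k ≤ x → j ≤ x := by
  induction l with
  | nil => simp at h
  | cons a l ih =>
    rcases List.pairwise_cons.mp hs with ⟨ha, hl⟩
    by_cases hka : k ≤ a
    · have : j = a := by
        have h0 : a = j := by simpa [List.find?_cons, hka] using h
        omega
      subst this
      refine ⟨List.mem_cons_self, hka, ?_⟩
      intro x hx _
      rcases List.mem_cons.mp hx with rfl | hx
      · exact le_refl _
      · exact le_of_lt (ha x hx)
    · have h' : l.find? (fun c => decide (k ≤ c)) = some j := by
        simpa [List.find?_cons, hka] using h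
      obtain ⟨hj, hkj, hmin⟩ := ih hl h'
      refine ⟨List.mem_cons_of_mem _ hj, hkj, ?_⟩
      intro x hx hkx
      rcases List.mem_cons.mp hx with rfl | hx
      · exact absurd hkx hka
      · exact hmin x hx hkx

-- bridge: Python's str.find(sub, k) is the first entry ≥ k of the occurrence list
theorem findFrom_occ (s sub : List Char) (k : Nat) (hk : k ≤ s.length) :
    PySem.Chars.findFrom s sub (k : Int) =
      (match (pvOcc s sub).find? (fun c => decide (k ≤ c)) with
       | none => -1
       | some j => (j : Int)) := by
  cases h : (pvOcc s sub).find? (fun c => decide (k ≤ c)) with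
  | none =>
    have hnone : ∀ x ∈ pvOcc s sub, ¬ k ≤ x := by
      intro x hx hkx
      exact absurd (by simpa using (List.find?_eq_none.mp h) x hx) (by simpa using hkx)
    rw [(PySem.Chars.findFrom_natCast_eq_neg_one_iff s sub k hk)]
    intro hinf
    obtain ⟨t, hpt, hts⟩ := List.infix_iff_prefix_suffix.mp hinf
    obtain ⟨m, hm⟩ : ∃ m, sub <+: (s.drop k).drop m := by
      rcases List.suffix_iff_eq_drop.mp hts with heq
      exact ⟨_, heq ▸ hpt⟩
    rw [List.drop_drop] at hm
    by_cases hmn : k + m ≤ s.length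
    · exact hnone (k + m) (pvOcc_mem.mpr ⟨hmn, hm⟩) (by omega)
    · have : sub = [] := by
        have : List.drop (k + m) s = [] := List.drop_eq_nil_of_le (by omega)
        simpa [this] using List.prefix_nil.mp (this ▸ hm)
      exact hnone k (pvOcc_mem.mpr ⟨hk, by simp [this]⟩) (le_refl k)
  | some j =>
    obtain ⟨hj, hkj, hmin⟩ := find?_ge_sorted (pvOcc_sorted s sub) h
    obtain ⟨hjn, hjpre⟩ := pvOcc_mem.mp hj
    have hne : PySem.Chars.findFrom s sub (k : Int) ≠ -1 := by
      rw [Ne, (PySem.Chars.findFrom_natCast_eq_neg_one_iff s sub k hk), not_not]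
      have : sub <+: (s.drop k).drop (j - k) := by
        rw [List.drop_drop]
        have : k + (j - k) = j := by omega
        rw [this]; exact hjpre
      exact this.isInfix.trans (List.drop_suffix _ _).isInfix
    obtain ⟨hkr, hrpre, hrmin⟩ := PySem.Chars.findFrom_natCast_spec s sub k hk hne
    set r := PySem.Chars.findFrom s sub (k : Int) with hr
    have hr0 : 0 ≤ r := le_trans (by exact_mod_cast Nat.zero_le k) hkr
    have hkrn : k ≤ r.toNat := by omega
    have hrn : r.toNat ≤ s.length := by
      by_contra hgt
      have hsub : sub = [] := by
        have hdrop : List.drop r.toNat s = [] := List.drop_eq_nil_of_le (by omega)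
        simpa [hdrop] using List.prefix_nil.mp (hdrop ▸ hrpre)
      exact hrmin k (le_refl k) (by omega) (by simp [hsub])
    have h1 : j ≤ r.toNat := hmin r.toNat (pvOcc_mem.mpr ⟨hrn, hrpre⟩) hkrn
    have h2 : ¬ j < r.toNat := fun hlt => hrmin j hkj hlt hjpre
    have : r.toNat = j := by omega
    simp only []
    omega

-- chained interval lists (each interval starts after `pos`, ends by `n`, in order)
inductive pvChained (n : Nat) : Nat → List (Nat × Nat) → Prop
  | nil (pos : Nat) : pvChained n pos []
  | cons {pos a b : Nat} {rest : List (Nat × Nat)} :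
      pos ≤ a → a ≤ b → b ≤ n → pvChained n b rest → pvChained n pos ((a, b) :: rest)

theorem pairs_chained (s c : List Char) (lo : Nat) :
    ∀ (opens' : List Nat) (pos : Nat),
      pvChained s.length pos (pvPairs (pvOcc s c) lo c.length opens' pos) := by
  intro opens'
  induction opens' with
  | nil => intro pos; exact pvChained.nil pos
  | cons o rest ih =>
    intro pos
    by_cases hlt : o < pos
    · simpa [pvPairs, hlt] using ih pos
    · rw [pvPairs, if_neg hlt]
      cases hfind : (pvOcc s c).find? (fun x => decide (o + lo ≤ x)) with
      | none => exact pvChained.nil pos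
      | some cp =>
        have hcp : o + lo ≤ cp := by simpa using List.find?_some hfind
        have hcpn : cp + c.length ≤ s.length := pvOcc_add_le (List.mem_of_find?_eq_some hfind)
        exact pvChained.cons (by omega) (by omega) hcpn (ih (cp + c.length))

-- characterization of pvMarkA: set positions [a, b) of the mask to 1
theorem pvMarkA_eq_aux : ∀ (d a : Nat) (mask : List Int), a + d ≤ mask.length →
    pvMarkA mask a (a + d) = mask.take a ++ List.replicate d 1 ++ mask.drop (a + d) := by
  intro d
  induction d with
  | zero =>
    intro a mask _
    simp [pvMarkA, PySem.List.pyRange]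
  | succ d ih =>
    intro a mask hlen
    have halen : a < mask.length := by omega
    have hstep : PySem.List.pyRange (a : Int) ((a + (d + 1) : Nat) : Int) 1 =
        (a : Int) :: PySem.List.pyRange ((a : Int) + 1) ((a + (d + 1) : Nat) : Int) 1 :=
      PySem.List.pyRange_one_cons (by push_cast; omega)
    have hcast : ((a : Int) + 1) = (((a + 1 : Nat)) : Int) := by push_cast; ring
    have h2 : a + (d + 1) = (a + 1) + d := by omega
    have hih := ih (a + 1) (mask.set a 1) (by simpa using (by omega : a + 1 + d ≤ mask.length))
    have hset : mask.set a 1 = mask.take a ++ 1 :: mask.drop (a + 1) :=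
      List.set_eq_take_cons_drop 1 halen
    have hta : (mask.take a ++ 1 :: mask.drop (a + 1)).take (a + 1) = mask.take a ++ [1] := by
      rw [List.take_append]
      simp [List.length_take, Nat.min_eq_left (le_of_lt halen)]
    have htd : (mask.take a ++ 1 :: mask.drop (a + 1)).drop (a + 1 + d) = mask.drop (a + 1 + d) := by
      rw [List.drop_append, List.drop_eq_nil_of_le (by simp [List.length_take]; omega),
        List.length_take_of_le (le_of_lt halen)]
      have h3 : a + 1 + d - a = d + 1 := by omega
      rw [h3]
      simp [List.drop_drop]
    rw [pvMarkA, hstep, List.foldl_cons]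
    simp only [Int.toNat_natCast]
    rw [pvMarkA] at hih
    rw [hcast, h2, hih, hset, hta, htd]
    simp [List.replicate_succ]

theorem pvMarkA_eq (mask : List Int) (a b : Nat) (hab : a ≤ b) (hb : b ≤ mask.length) :
    pvMarkA mask a b = mask.take a ++ List.replicate (b - a) 1 ++ mask.drop b := by
  have h := pvMarkA_eq_aux (b - a) a mask (by omega)
  have : a + (b - a) = b := by omega
  rwa [this] at h

-- folding pvMarkA over a chained interval list builds the concatenated mask
theorem foldMark_emit (n : Nat) :
    ∀ (ivs : List (Nat × Nat)) (pos : Nat) (u : List Int), u.length = pos →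
      pvChained n pos ivs →
      ivs.foldl (fun m ab => pvMarkA m ab.1 ab.2) (u ++ List.replicate (n - pos) 0) =
        u ++ pvEmit n ivs pos := by
  intro ivs
  induction ivs with
  | nil => intro pos u _ _; simp [pvEmit]
  | cons ab rest ih =>
    rintro pos u hu hch
    obtain ⟨a, b⟩ := ab
    cases hch with
    | cons hpa hab hbn hrest =>
      have hposn : pos ≤ n := by omega
      have hlen : (u ++ List.replicate (n - pos) (0 : Int)).length = n := by
        simp [hu]; omega
      rw [List.foldl_cons]
      have hmark := pvMarkA_eq (u ++ List.replicate (n - pos) 0) a b hab (by omega)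
      have hta : (u ++ List.replicate (n - pos) (0 : Int)).take a =
          u ++ List.replicate (a - pos) 0 := by
        rw [List.take_append, hu, List.take_replicate]
        have : min (a - pos) (n - pos) = a - pos := by omega
        rw [this, List.take_of_length_le (by omega)]
      have htd : (u ++ List.replicate (n - pos) (0 : Int)).drop b =
          List.replicate (n - b) 0 := by
        rw [List.drop_append, hu, List.drop_replicate]
        have : n - pos - (b - pos) = n - b := by omega
        rw [this, List.drop_eq_nil_of_le (by omega)]
        simp
      rw [hmark, hta, htd]
      have hru : ((u ++ List.replicate (a - pos) 0 ++ List.replicate (b - a) 1)).length = b := by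
        simp [hu]; omega
      have := ih b (u ++ List.replicate (a - pos) 0 ++ List.replicate (b - a) 1) hru hrest
      simp only [List.append_assoc] at *
      rw [this]
      simp [pvEmit]

-- find? over `pref ++ l` when everything in pref fails
theorem find?_append_of_fail {pref l : List Nat} {p : Nat → Bool}
    (h : ∀ x ∈ pref, ¬ p x) : (pref ++ l).find? p = l.find? p := by
  rw [List.find?_append]
  rw [List.find?_eq_none.mpr h]
  rfl

-- the main loop correspondence: A's while-loop computes B's interval fold
theorem loopA_pairs (s o c : List Char) (hPre : ¬ (o = [] ∧ c = [])) :
    ∀ (opens' pref : List Nat) (pos : Nat) (mask : List Int) (fuel : Nat),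
      pvOcc s o = pref ++ opens' → (∀ x ∈ pref, x < pos) → pos ≤ s.length →
      opens'.length + 1 ≤ fuel →
      pvLoopA s o c fuel mask pos =
        (pvPairs (pvOcc s c) o.length c.length opens' pos).foldl
          (fun m ab => pvMarkA m ab.1 ab.2) mask := by
  intro opens'
  induction opens' with
  | nil =>
    intro pref pos mask fuel hocc hpref hpos hfuel
    obtain ⟨f, rfl⟩ : ∃ f, fuel = f + 1 := ⟨fuel - 1, by omega⟩
    rw [pvLoopA]
    have hfind : (pvOcc s o).find? (fun x => decide (pos ≤ x)) = none := by
      rw [hocc, List.append_nil, List.find?_eq_none]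
      intro x hx
      simpa using Nat.not_le.mpr (hpref x hx)
    rw [findFrom_occ s o pos hpos, hfind]
    simp [pvPairs]
  | cons o1 rest ih =>
    intro pref pos mask fuel hocc hpref hpos hfuel
    by_cases hlt : o1 < pos
    · rw [pvPairs, if_pos hlt]
      exact ih (pref ++ [o1]) pos mask fuel (by simpa using hocc)
        (by intro x hx; rcases List.mem_append.mp hx with h | h
            · exact hpref x h
            · simpa using (List.mem_singleton.mp h) ▸ hlt)
        hpos (by simp at hfuel ⊢; omega)
    · obtain ⟨f, rfl⟩ : ∃ f, fuel = f + 1 := ⟨fuel - 1, by omega⟩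
      rw [pvLoopA, pvPairs, if_neg hlt]
      have ho1 : o1 ∈ pvOcc s o := by rw [hocc]; exact List.mem_append_right _ List.mem_cons_self
      have hfind : (pvOcc s o).find? (fun x => decide (pos ≤ x)) = some o1 := by
        rw [hocc, find?_append_of_fail (by intro x hx; simpa using Nat.not_le.mpr (hpref x hx))]
        simp [List.find?_cons, Nat.not_lt.mp hlt]
      rw [findFrom_occ s o pos hpos, hfind]
      simp only []
      have ho1ne : ((o1 : Int)) ≠ -1 := by omega
      rw [if_neg ho1ne]
      have ho1lo : o1 + o.length ≤ s.length := pvOcc_add_le ho1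
      have hcast : ((o1 : Int) + (o.length : Int)) = (((o1 + o.length : Nat)) : Int) := by
        push_cast; ring
      rw [hcast, findFrom_occ s c (o1 + o.length) ho1lo]
      cases hcfind : (pvOcc s c).find? (fun x => decide (o1 + o.length ≤ x)) with
      | none => simp
      | some cp =>
        simp only []
        have hcpne : ((cp : Int)) ≠ -1 := by omega
        rw [if_neg hcpne]
        have hcp : o1 + o.length ≤ cp := by simpa using List.find?_some hcfind
        have hcpn : cp + c.length ≤ s.length := pvOcc_add_le (List.mem_of_find?_eq_some hcfind)
        have hmin : min ((cp : Int).toNat + c.length) s.length = cp + c.length := by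
          simp [Int.toNat_natCast]; omega
        rw [hmin]
        have hprog : o1 < cp + c.length := by
          by_cases ho : o.length = 0
          · have hc : c ≠ [] := by
              intro hc0
              exact hPre ⟨List.length_eq_zero_iff.mp ho, hc0⟩
            have : 0 < c.length := List.length_pos_iff.mpr hc
            omega
          · omega
        rw [List.foldl_cons]
        have := ih (pref ++ [o1]) (cp + c.length)
          (pvMarkA mask (o1 : Int).toNat (cp + c.length)) f
          (by simpa using hocc)
          (by intro x hx; rcases List.mem_append.mp hx with h | h
              · exact lt_trans (hpref x h) (by omega)
              · have : x = o1 := List.mem_singleton.mp h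
                omega)
          hcpn (by simp [List.length_cons] at hfuel; omega)
        simpa [Int.toNat_natCast] using this

-- ===== VERDICT (by name: the statement is the Claim_ definition above) =====
theorem get_bigmodel_mask_spec : Claim_equal_get_bigmodel_mask := by
  intro text open_tag close_tag _ hpre
  unfold Spec_get_bigmodel_mask get_bigmodel_mask get_bigmodel_mask_alt
  simp only []
  set s := text.toList
  have hPre' : ¬ (open_tag.toList = [] ∧ close_tag.toList = []) := by
    intro ⟨h1, h2⟩
    exact hpre ⟨String.toList_eq_nil_iff.mp h1, String.toList_eq_nil_iff.mp h2⟩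
  have hfuel : (pvOcc s open_tag.toList).length + 1 ≤ s.length + 2 := by
    have := List.length_filter_le
      (fun i => PySem.Chars.startswith (s.drop i) open_tag.toList)
      (List.range (s.length + 1))
    simp [pvOcc] at this ⊢
    omega
  rw [loopA_pairs s open_tag.toList close_tag.toList hPre'
      (pvOcc s open_tag.toList) [] 0 (List.replicate s.length 0) (s.length + 2)
      (by simp) (by simp) (Nat.zero_le _) hfuel]
  have := foldMark_emit s.length
    (pvPairs (pvOcc s close_tag.toList) open_tag.toList.length close_tag.toList.length
      (pvOcc s open_tag.toList) 0) 0 [] rfl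
    (pairs_chained s close_tag.toList open_tag.toList.length
      (pvOcc s open_tag.toList) 0)
  simpa using this
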